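-- pv_equiv track=rewrite | github.com/westsidemusic/westsidemusic | Newscraper.py | getRelevantLinks
-- ===== SOURCE A (Python) =====
-- def getRelevantLinks(links, linksToSkip):
--     relevantLinks = []
--     for link in links:
--         skipLink = False
--         for ignoreString in linksToSkip:
--             if ignoreString in link:
--                 skipLink = True
--                 break
--         if skipLink == True:
--             continue
--         else:
--             relevantLinks.append(link)
--     return relevantLinks
-- ===== SOURCE B (Python) =====
-- def getRelevantLinks(links, linksToSkip):
--     remaining = links
--     for ignoreString in linksToSkip:
--         remaining = [link for link in remaining if ignoreString not in link]
--     return remaining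
-- ===== Notes on version B (the rewrite author's own statement) =====
-- stated objective: alternative
-- what changed: Pattern-major instead of link-major: B successively filters the whole link list once per skip pattern, eliminating A's per-link flag-and-break inner scan.
import Mathlib
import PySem

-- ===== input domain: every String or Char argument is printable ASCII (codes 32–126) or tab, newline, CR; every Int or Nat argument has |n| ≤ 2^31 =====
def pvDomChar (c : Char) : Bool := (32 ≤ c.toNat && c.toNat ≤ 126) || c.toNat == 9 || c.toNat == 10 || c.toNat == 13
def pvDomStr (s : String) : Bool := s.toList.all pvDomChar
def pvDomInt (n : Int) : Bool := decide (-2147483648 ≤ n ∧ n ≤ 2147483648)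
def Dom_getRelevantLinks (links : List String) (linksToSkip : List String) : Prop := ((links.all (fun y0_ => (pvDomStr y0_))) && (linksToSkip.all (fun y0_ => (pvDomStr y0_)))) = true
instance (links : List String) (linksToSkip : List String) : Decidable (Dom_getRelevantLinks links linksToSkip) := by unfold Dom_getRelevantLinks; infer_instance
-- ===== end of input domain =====

-- B filters the link list once per skip pattern (pattern-major) instead of A's per-link inner scan with a break flag; same return value, alternative decomposition.


-- ===== PORT A =====
-- inner 'for ignoreString in linksToSkip: if ignoreString in link: skipLink = True; break'
def skipScan (link : String) : List String → Bool
  | [] => false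
  | p :: ps => if PySem.Str.isIn p link then true else skipScan link ps

def getRelevantLinks (links : List String) (linksToSkip : List String) : List String :=
  links.foldl (fun relevantLinks link =>
    if skipScan link linksToSkip then relevantLinks else relevantLinks ++ [link]) []

-- ===== PORT B =====
def getRelevantLinks_alt (links : List String) (linksToSkip : List String) : List String :=
  linksToSkip.foldl (fun remaining ignoreString =>
    remaining.filter (fun link => !(PySem.Str.isIn ignoreString link))) links

-- ===== PRECONDITION & SPEC =====
def Spec_getRelevantLinks (links : List String) (linksToSkip : List String) (out : List String) : Prop := out = getRelevantLinks_alt links linksToSkip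
instance (links : List String) (linksToSkip : List String) (out : List String) : Decidable (Spec_getRelevantLinks links linksToSkip out) := by unfold Spec_getRelevantLinks; infer_instance

-- ===== CLAIM (what is proved, stated in full; the proofs are below) =====
def Claim_equal_getRelevantLinks : Prop := ∀ (links : List String) (linksToSkip : List String), Dom_getRelevantLinks links linksToSkip → Spec_getRelevantLinks links linksToSkip (getRelevantLinks links linksToSkip)

-- ===== LEMMAS AND PROOFS =====

theorem foldlA_acc (linksToSkip : List String) (links : List String) (acc : List String) :
    links.foldl (fun relevantLinks link =>
      if skipScan link linksToSkip then relevantLinks else relevantLinks ++ [link]) acc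
    = acc ++ links.filter (fun l => !skipScan l linksToSkip) := by
  induction links generalizing acc with
  | nil => simp
  | cons h t ih =>
    simp only [List.foldl_cons, List.filter_cons]
    by_cases hs : skipScan h linksToSkip
    · simp [hs, ih]
    · simp [hs, ih]

theorem A_eq_filter (links linksToSkip : List String) :
    getRelevantLinks links linksToSkip
    = links.filter (fun l => !skipScan l linksToSkip) := by
  simpa using foldlA_acc linksToSkip links []

theorem B_eq_filter (linksToSkip links : List String) :
    getRelevantLinks_alt links linksToSkip
    = links.filter (fun l => !skipScan l linksToSkip) := by
  induction linksToSkip generalizing links with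
  | nil => simp [getRelevantLinks_alt, skipScan]
  | cons p ps ih =>
    simp only [getRelevantLinks_alt, List.foldl_cons]
    rw [show ∀ xs, (List.foldl (fun remaining ignoreString =>
        remaining.filter (fun link => !(PySem.Str.isIn ignoreString link))) xs ps)
        = getRelevantLinks_alt xs ps from fun _ => rfl, ih]
    rw [List.filter_filter]
    apply List.filter_congr
    intro l _
    by_cases h : PySem.Str.isIn p l <;> simp [skipScan, h, Bool.and_comm]

-- ===== VERDICT (by name: the statement is the Claim_ definition above) =====
theorem getRelevantLinks_spec : Claim_equal_getRelevantLinks := by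
  intro links linksToSkip _
  unfold Spec_getRelevantLinks
  rw [A_eq_filter, B_eq_filter]
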